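-- pv_equiv track=rewrite | github.com/HMXHIU/christmas | christmas/dungeon-master/dm/utils.py | string_to_random_number
-- ===== SOURCE A (Python) =====
-- def string_to_random_number(s: str) -> int:
--     """
--     Converts a string (seed) to a random number.
--
--     Args:
--         s (str): The string to convert.
--
--     Returns:
--         int: The random number generated from the string (seed).
--     """
--     hash_value = 0
--     if len(s) == 0:
--         return hash_value
--     for char in s:
--         hash_value = ((hash_value << 5) - hash_value + ord(char)) & 0xFFFFFFFF
--         hash_value = hash_value | 0  # Ensure 32-bit integer behavior
--     return (
--         hash_value if hash_value >= 0 else ~hash_value + 1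
--     )  # Two's complement for negative numbers
-- ===== SOURCE B (Python) =====
-- def string_to_random_number(s: str) -> int:
--     """Same hash, computed as the power-weighted sum sum(ord(c_i) * 31**(n-1-i))
--     accumulated in reverse order, with both accumulators kept 32-bit."""
--     total = 0
--     power = 1
--     for char in reversed(s):
--         total = (total + ord(char) * power) & 0xFFFFFFFF
--         power = (power * 31) & 0xFFFFFFFF
--     return total
-- ===== Notes on version B (the rewrite author's own statement) =====
-- stated objective: alternative
-- what changed: Replaces A's per-character Horner step (shift, subtract, mask, or-with-0, final sign fixup) with a reverse-order power-weighted sum: total accumulates ord(c)*power with an explicit running power of 31, both kept 32-bit by masking.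
import Mathlib
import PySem

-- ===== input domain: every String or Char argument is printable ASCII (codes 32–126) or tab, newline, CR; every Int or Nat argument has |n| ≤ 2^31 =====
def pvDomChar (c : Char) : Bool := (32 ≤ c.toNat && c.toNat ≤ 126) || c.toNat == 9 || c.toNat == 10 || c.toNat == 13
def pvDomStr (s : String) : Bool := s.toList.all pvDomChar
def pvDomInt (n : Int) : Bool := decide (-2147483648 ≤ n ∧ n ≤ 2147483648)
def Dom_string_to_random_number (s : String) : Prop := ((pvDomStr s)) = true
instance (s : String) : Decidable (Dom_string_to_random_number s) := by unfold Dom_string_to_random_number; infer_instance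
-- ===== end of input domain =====

-- B computes the hash as a reverse-order power-weighted sum (ord(c)*31^k) with a 32-bit-masked
-- running power, instead of A's per-step shift/mask Horner loop: an alternative decomposition.


-- ===== PORT A =====
-- one loop iteration of A: hash = ((hash << 5) - hash + ord(char)) & 0xFFFFFFFF; hash = hash | 0
def pvStepA (h : Int) (c : Char) : Int :=
  PySem.Int.bor (PySem.Int.band ((h <<< (5:Nat)) - h + (c.toNat : Int)) 0xFFFFFFFF) 0

def string_to_random_number (s : String) : Int :=
  let hash0 : Int := 0
  if PySem.Str.len s = 0 then hash0
  else
    let h := s.toList.foldl pvStepA hash0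
    if h ≥ 0 then h else ~~~h + 1   -- two's-complement branch, as in A

-- ===== PORT B =====
-- one loop iteration of B over reversed(s):
-- total = (total + ord(char)*power) & 0xFFFFFFFF; power = (power*31) & 0xFFFFFFFF
def pvStepB (tp : Int × Int) (c : Char) : Int × Int :=
  (PySem.Int.band (tp.1 + (c.toNat : Int) * tp.2) 0xFFFFFFFF,
   PySem.Int.band (tp.2 * 31) 0xFFFFFFFF)

def string_to_random_number_alt (s : String) : Int :=
  let tp := s.toList.reverse.foldl pvStepB (0, 1)
  tp.1

-- ===== PRECONDITION & SPEC =====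
def Spec_string_to_random_number (s : String) (out : Int) : Prop := out = string_to_random_number_alt s
instance (s : String) (out : Int) : Decidable (Spec_string_to_random_number s out) := by unfold Spec_string_to_random_number; infer_instance

-- ===== CLAIM (what is proved, stated in full; the proofs are below) =====
def Claim_equal_string_to_random_number : Prop := ∀ (s : String), Dom_string_to_random_number s → Spec_string_to_random_number s (string_to_random_number s)

-- ===== LEMMAS AND PROOFS =====

-- the common unmasked polynomial step: a ↦ 31*a + ord(c)
def pvPoly (a : Int) (c : Char) : Int := 31 * a + (c.toNat : Int)

theorem pv_band_mask (x : Int) (hx : 0 ≤ x) :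
    PySem.Int.band x 0xFFFFFFFF = x % 4294967296 := by
  rw [PySem.Int.band_of_nonneg hx (by norm_num)]
  have h1 : Int.toNat 0xFFFFFFFF = 2 ^ 32 - 1 := rfl
  rw [h1, Nat.and_two_pow_sub_one_eq_mod]
  omega

theorem pv_stepA_eq (h : Int) (hh : 0 ≤ h) (c : Char) :
    pvStepA h c = pvPoly h c % 4294967296 := by
  unfold pvStepA pvPoly
  rw [PySem.Int.bor_zero, Int.shiftLeft_eq]
  have hnn : (0:Int) ≤ h * 2 ^ 5 - h + (c.toNat : Int) := by
    have : (0:Int) ≤ (c.toNat : Int) := Int.natCast_nonneg _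
    nlinarith
  rw [pv_band_mask _ hnn]
  have : h * 2 ^ 5 - h + (c.toNat : Int) = 31 * h + (c.toNat : Int) := by ring
  rw [this]

-- A's fold equals the unmasked polynomial fold, reduced mod 2^32
theorem pv_foldA (l : List Char) : ∀ (a : Int),
    List.foldl pvStepA (a % 4294967296) l = List.foldl pvPoly a l % 4294967296 := by
  induction l with
  | nil => intro a; simp
  | cons c l ih =>
    intro a
    have hm : 0 ≤ a % 4294967296 := Int.emod_nonneg _ (by norm_num)
    have hstep : pvStepA (a % 4294967296) c = pvPoly a c % 4294967296 := by
      rw [pv_stepA_eq _ hm c]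
      unfold pvPoly
      omega
    simp only [List.foldl_cons, hstep]
    exact ih (pvPoly a c)

-- shifting the seed of the polynomial fold
theorem pv_poly_seed (l : List Char) : ∀ (a : Int),
    List.foldl pvPoly a l = a * 31 ^ l.length + List.foldl pvPoly 0 l := by
  induction l with
  | nil => intro a; simp
  | cons c l ih =>
    intro a
    simp only [List.foldl_cons, List.length_cons]
    rw [ih (pvPoly a c), ih (pvPoly 0 c)]
    unfold pvPoly
    ring

-- B's reversed fold computes the polynomial value and the running power, each mod 2^32
theorem pv_foldB (l : List Char) :
    List.foldl pvStepB (0, 1) l.reverse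
      = (List.foldl pvPoly 0 l % 4294967296, 31 ^ l.length % 4294967296) := by
  rw [List.foldl_reverse]
  induction l with
  | nil => rfl
  | cons c l ih =>
    simp only [List.foldr_cons, ih, List.length_cons]
    unfold pvStepB
    simp only
    have hM : (0:Int) < 4294967296 := by norm_num
    have ht : 0 ≤ List.foldl pvPoly 0 l % 4294967296 := Int.emod_nonneg _ (by norm_num)
    have hp : 0 ≤ (31:Int) ^ l.length % 4294967296 := Int.emod_nonneg _ (by norm_num)
    have hc : (0:Int) ≤ (c.toNat : Int) := Int.natCast_nonneg _
    rw [Prod.mk.injEq]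
    constructor
    · rw [pv_band_mask _ (by positivity)]
      have h1 : (List.foldl pvPoly 0 l % 4294967296 + (c.toNat : Int) * ((31:Int) ^ l.length % 4294967296)) % 4294967296
          = (List.foldl pvPoly 0 l + (c.toNat : Int) * 31 ^ l.length) % 4294967296 := by
        have e1 : List.foldl pvPoly 0 l % 4294967296 ≡ List.foldl pvPoly 0 l [ZMOD 4294967296] :=
          Int.emod_emod_of_dvd _ dvd_rfl
        have e2 : (c.toNat : Int) * ((31:Int) ^ l.length % 4294967296) ≡ (c.toNat : Int) * 31 ^ l.length [ZMOD 4294967296] :=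
          Int.ModEq.mul_left _ (Int.emod_emod_of_dvd _ dvd_rfl)
        exact e1.add e2
      rw [h1]
      congr 1
      rw [List.foldl_cons, pv_poly_seed l (pvPoly 0 c)]
      unfold pvPoly
      ring
    · rw [pv_band_mask _ (by positivity)]
      have e : ((31:Int) ^ l.length % 4294967296) * 31 ≡ (31:Int) ^ l.length * 31 [ZMOD 4294967296] :=
        Int.ModEq.mul_right _ (Int.emod_emod_of_dvd _ dvd_rfl)
      rw [e, pow_succ]

-- ===== VERDICT (by name: the statement is the Claim_ definition above) =====
theorem string_to_random_number_spec : Claim_equal_string_to_random_number := by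
  intro s _
  unfold Spec_string_to_random_number string_to_random_number string_to_random_number_alt
  simp only [pv_foldB s.toList]
  by_cases hlen : PySem.Str.len s = 0
  · have : s.toList = [] := by
      have := PySem.Str.len_eq s
      have : s.toList.length = 0 := by omega
      exact List.length_eq_zero_iff.mp this
    simp [this]
  · simp only [hlen, if_false]
    have hA : List.foldl pvStepA 0 s.toList = List.foldl pvPoly 0 s.toList % 4294967296 := by
      have := pv_foldA s.toList 0
      simpa using this
    rw [hA]
    have hnn : 0 ≤ List.foldl pvPoly 0 s.toList % 4294967296 :=
      Int.emod_nonneg _ (by norm_num)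
    simp [hnn]
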